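-- pv_equiv track=rewrite | github.com/201710757/cpp_study | kakao2018/test3.py | solution
-- ===== SOURCE A (Python) =====
-- def solution(m, musicinfos):
--     answer = ''
--     ans_list = {}
--
--     for music in musicinfos:
--         music_seq = []
--
--         tmp = music.split(',')
--
--         # time
--         h1 = int(tmp[0].split(':')[0])
--         m1 = int(tmp[0].split(':')[1])
--         h2 = int(tmp[1].split(':')[0])
--         m2 = int(tmp[1].split(':')[1])
--         if m2 < m1:
--             h2 -= 1
--             m2 += 60
--         h = h2 - h1
--         min = m2 - m1
--         times = h*60 + min
--
--         # make sequence
--         m_s = ""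
--         tmp[3] = tmp[3].replace('C#', 'c')
--         tmp[3] = tmp[3].replace('D#', 'd')
--         tmp[3] = tmp[3].replace('F#', 'f')
--         tmp[3] = tmp[3].replace('G#', 'g')
--         tmp[3] = tmp[3].replace('A#', 'a')
--
--         m = m.replace('C#', 'c')
--         m = m.replace('D#', 'd')
--         m = m.replace('F#', 'f')
--         m = m.replace('G#', 'g')
--         m = m.replace('A#', 'a')
--
--         for i in range(times):
--             s = tmp[3][i%len(tmp[3])]
--             m_s += s
--
--         if m in m_s:
--             ans_list[tmp[2]] = times
--
--
--     s_dict = sorted(ans_list.items(), key = lambda item : item[1], reverse = True)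
--
--
--     if len(ans_list) > 0:
--         return s_dict[0][0]
--     else:
--         return "(None)"
-- ===== SOURCE B (Python) =====
-- SHARPS = (('C#', 'c'), ('D#', 'd'), ('F#', 'f'), ('G#', 'g'), ('A#', 'a'))
--
--
-- def _subst(s):
--     for old, new in SHARPS:
--         s = s.replace(old, new)
--     return s
--
--
-- def solution(m, musicinfos):
--     best = {}
--     for music in musicinfos:
--         fields = music.split(',')
--         t = fields[0].split(':')
--         u = fields[1].split(':')
--         times = (int(u[0]) * 60 + int(u[1])) - (int(t[0]) * 60 + int(t[1]))
--         m = _subst(m)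
--         code = _subst(fields[3])
--         reps = max(times, 0)
--         melody = (code * (reps // len(code) + 1))[:reps] if code else ''
--         if m in melody:
--             best[fields[2]] = times
--     if not best:
--         return "(None)"
--     return max(best.items(), key=lambda kv: kv[1])[0]
-- ===== Notes on version B (the rewrite author's own statement) =====
-- stated objective: simpler
-- what changed: B computes the duration directly as end-minutes minus start-minutes instead of A's borrow-adjusting branch, builds the looped melody by string repetition and a slice instead of A's char-by-char modulo-indexing loop, and picks the answer with a single-pass max over the dict items instead of sorting them descending and taking the head.
import Mathlib
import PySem

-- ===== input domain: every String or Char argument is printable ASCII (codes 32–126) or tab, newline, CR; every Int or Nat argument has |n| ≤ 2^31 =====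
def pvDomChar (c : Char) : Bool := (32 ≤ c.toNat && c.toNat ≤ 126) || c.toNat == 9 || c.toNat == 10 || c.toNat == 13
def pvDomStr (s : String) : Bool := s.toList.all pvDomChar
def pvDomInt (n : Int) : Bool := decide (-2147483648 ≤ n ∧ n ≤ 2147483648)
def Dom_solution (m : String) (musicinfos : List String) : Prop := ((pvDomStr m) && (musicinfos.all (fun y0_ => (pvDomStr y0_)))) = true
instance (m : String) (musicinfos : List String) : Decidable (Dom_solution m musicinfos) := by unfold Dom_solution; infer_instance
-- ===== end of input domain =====

-- B replaces A's borrow-adjusting time arithmetic by a direct minute difference, the char-by-char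
-- modulo-indexing melody loop by repetition+slice, and the descending sort + head by a one-pass max.
-- A also rebinds its parameter `m` (a local rebinding, not observable by the caller); B does the same.

-- ===== PORT A =====
-- A's five successive .replace calls on a string (ported on code-point lists)
def pvSubstA (s : List Char) : List Char :=
  PySem.Chars.replace (PySem.Chars.replace (PySem.Chars.replace (PySem.Chars.replace
    (PySem.Chars.replace s "C#".toList "c".toList) "D#".toList "d".toList)
    "F#".toList "f".toList) "G#".toList "g".toList) "A#".toList "a".toList

-- one iteration of A's `for music in musicinfos` loop; state = (current m, ans_list)
def pvStepA (st : List Char × PySem.Dict (List Char) Int) (music : List Char) :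
    List Char × PySem.Dict (List Char) Int :=
  let tmp := PySem.Chars.splitOn music [',']
  let h1 := (PySem.Int.ofChars? ((PySem.List.pyGet? (PySem.Chars.splitOn ((PySem.List.pyGet? tmp 0).getD []) [':']) 0).getD [])).getD 0
  let m1 := (PySem.Int.ofChars? ((PySem.List.pyGet? (PySem.Chars.splitOn ((PySem.List.pyGet? tmp 0).getD []) [':']) 1).getD [])).getD 0
  let h2 := (PySem.Int.ofChars? ((PySem.List.pyGet? (PySem.Chars.splitOn ((PySem.List.pyGet? tmp 1).getD []) [':']) 0).getD [])).getD 0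
  let m2 := (PySem.Int.ofChars? ((PySem.List.pyGet? (PySem.Chars.splitOn ((PySem.List.pyGet? tmp 1).getD []) [':']) 1).getD [])).getD 0
  -- (the .getD defaults above are never used under Pre_solution, where the indexing and int() succeed)
  let h2' := if m2 < m1 then h2 - 1 else h2
  let m2' := if m2 < m1 then m2 + 60 else m2
  let h := h2' - h1
  let mn := m2' - m1
  let times := h * 60 + mn
  let tmp3 := pvSubstA ((PySem.List.pyGet? tmp 3).getD [])
  let mA := pvSubstA st.1
  let ms := (PySem.List.pyRange 0 times 1).foldl
    (fun acc i => acc ++ ((PySem.List.pyGet? tmp3 (PySem.Int.mod i (PySem.List.len tmp3))).map (fun c => [c])).getD []) []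
  if PySem.Chars.isIn mA ms then (mA, st.2.insert ((PySem.List.pyGet? tmp 2).getD []) times)
  else (mA, st.2)

def solution (m : String) (musicinfos : List String) : String :=
  let st := musicinfos.foldl (fun st music => pvStepA st music.toList) (m.toList, PySem.Dict.empty)
  let sDict := PySem.List.sorted st.2.items (fun it => it.2) true
  if 0 < PySem.List.len st.2.items then String.ofList ((PySem.List.pyGet? sDict 0).getD ([], 0)).1
  else "(None)"

-- ===== PORT B =====
def pvSharpPairs : List (List Char × List Char) :=
  [("C#".toList, "c".toList), ("D#".toList, "d".toList), ("F#".toList, "f".toList),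
   ("G#".toList, "g".toList), ("A#".toList, "a".toList)]

def pvSubstB (s : List Char) : List Char :=
  pvSharpPairs.foldl (fun s p => PySem.Chars.replace s p.1 p.2) s

-- one iteration of B's loop; same state shape (B also rebinds m, like the Python)
def pvStepB (st : List Char × PySem.Dict (List Char) Int) (music : List Char) :
    List Char × PySem.Dict (List Char) Int :=
  let fields := PySem.Chars.splitOn music [',']
  let t := PySem.Chars.splitOn ((PySem.List.pyGet? fields 0).getD []) [':']
  let u := PySem.Chars.splitOn ((PySem.List.pyGet? fields 1).getD []) [':']
  let times :=
    ((PySem.Int.ofChars? ((PySem.List.pyGet? u 0).getD [])).getD 0 * 60 +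
     (PySem.Int.ofChars? ((PySem.List.pyGet? u 1).getD [])).getD 0) -
    ((PySem.Int.ofChars? ((PySem.List.pyGet? t 0).getD [])).getD 0 * 60 +
     (PySem.Int.ofChars? ((PySem.List.pyGet? t 1).getD [])).getD 0)
  let mB := pvSubstB st.1
  let code := pvSubstB ((PySem.List.pyGet? fields 3).getD [])
  let reps := max times 0
  let melody := if code = [] then []
    else PySem.List.slice
      (List.flatten (List.replicate (PySem.Int.floordiv reps (PySem.List.len code) + 1).toNat code))
      none (some reps)
  if PySem.Chars.isIn mB melody then (mB, st.2.insert ((PySem.List.pyGet? fields 2).getD []) times)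
  else (mB, st.2)

def solution_alt (m : String) (musicinfos : List String) : String :=
  let st := musicinfos.foldl (fun st music => pvStepB st music.toList) (m.toList, PySem.Dict.empty)
  if st.2.items = [] then "(None)"
  else String.ofList ((PySem.List.max? st.2.items (fun kv => kv.2)).getD ([], 0)).1

-- ===== PRECONDITION & SPEC =====
-- Pre_solution is exactly where the Python A returns: each entry splits into ≥ 4 comma fields, the two
-- time fields have ≥ 2 colon parts whose first two parse as int(), and the note code is nonempty after
-- sharp substitution unless the play time is ≤ 0 (otherwise A raises Index/Value/ZeroDivisionError).
def pvLineOK (music : List Char) : Bool :=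
  let tmp := PySem.Chars.splitOn music [',']
  let p0 := PySem.Chars.splitOn ((PySem.List.pyGet? tmp 0).getD []) [':']
  let p1 := PySem.Chars.splitOn ((PySem.List.pyGet? tmp 1).getD []) [':']
  decide (3 < tmp.length) && decide (1 < p0.length) && decide (1 < p1.length) &&
  (PySem.Int.ofChars? ((PySem.List.pyGet? p0 0).getD [])).isSome &&
  (PySem.Int.ofChars? ((PySem.List.pyGet? p0 1).getD [])).isSome &&
  (PySem.Int.ofChars? ((PySem.List.pyGet? p1 0).getD [])).isSome &&
  (PySem.Int.ofChars? ((PySem.List.pyGet? p1 1).getD [])).isSome &&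
  (decide (pvSubstA ((PySem.List.pyGet? tmp 3).getD []) ≠ []) ||
    decide (((PySem.Int.ofChars? ((PySem.List.pyGet? p1 0).getD [])).getD 0 * 60 + (PySem.Int.ofChars? ((PySem.List.pyGet? p1 1).getD [])).getD 0) -
    ((PySem.Int.ofChars? ((PySem.List.pyGet? p0 0).getD [])).getD 0 * 60 + (PySem.Int.ofChars? ((PySem.List.pyGet? p0 1).getD [])).getD 0) ≤ 0))

def Pre_solution (m : String) (musicinfos : List String) : Prop :=
  ∀ s ∈ musicinfos, pvLineOK s.toList = true
instance (m : String) (musicinfos : List String) : Decidable (Pre_solution m musicinfos) := by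
  unfold Pre_solution; infer_instance

def pvWitness_solution : String × List String := ("CC", ["12:00,12:14,WORLD,CC#DD#", "13:00,13:05,HELLO,ABC"])

def Spec_solution (m : String) (musicinfos : List String) (out : String) : Prop := out = solution_alt m musicinfos
instance (m : String) (musicinfos : List String) (out : String) : Decidable (Spec_solution m musicinfos out) := by unfold Spec_solution; infer_instance

-- ===== CLAIM (what is proved, stated in full; the proofs are below) =====
def Claim_equal_solution : Prop := ∀ (m : String) (musicinfos : List String), Dom_solution m musicinfos → Pre_solution m musicinfos → Spec_solution m musicinfos (solution m musicinfos)

-- ===== LEMMAS AND PROOFS =====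

-- B's substitution loop over the literal pair list is A's five nested replaces
theorem pvSubstB_eq (s : List Char) : pvSubstB s = pvSubstA s := rfl

-- A's branchy borrow arithmetic equals B's direct minute difference
theorem pvTimes (h1 m1 h2 m2 : Int) :
    ((if m2 < m1 then h2 - 1 else h2) - h1) * 60 + ((if m2 < m1 then m2 + 60 else m2) - m1) =
      (h2 * 60 + m2) - (h1 * 60 + m1) := by
  split_ifs <;> ring

-- element i of q concatenated copies of cs is cs[i % |cs|]
theorem pvFlattenRep_get (cs : List Char) :
    ∀ (q i : Nat), i < q * cs.length →
      (List.flatten (List.replicate q cs))[i]? = cs[i % cs.length]? := by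
  intro q
  induction q with
  | zero => intro i h; omega
  | succ q ih =>
    intro i h
    rw [List.replicate_succ, List.flatten_cons]
    by_cases hi : i < cs.length
    · rw [List.getElem?_append_left hi, Nat.mod_eq_of_lt hi]
    · push_neg at hi
      rw [List.getElem?_append_right hi, ih (i - cs.length) (by
        have := Nat.succ_mul q cs.length; nlinarith [Nat.sub_add_cancel hi]),
        Nat.mod_eq_sub_mod hi]

-- the cyclic melody: n characters read with modulo indexing = repeat-and-truncate
theorem pvCyc (cs : List Char) (hcs : cs ≠ []) (n : Nat) :
    (List.range n).map (fun k => cs.getD (k % cs.length) default) =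
      (List.flatten (List.replicate (n / cs.length + 1) cs)).take n := by
  have hlen : 0 < cs.length := List.length_pos_iff.2 hcs
  apply List.ext_getElem?
  intro i
  by_cases hi : i < n
  · rw [List.getElem?_take_of_lt hi, List.getElem?_map, List.getElem?_range hi]
    rw [pvFlattenRep_get cs _ i (by
      have hm := Nat.mod_lt i hlen
      have h2 := Nat.div_le_div_right (c := cs.length) (Nat.le_of_lt hi)
      calc i = cs.length * (i / cs.length) + i % cs.length := (Nat.div_add_mod i cs.length).symm
        _ < cs.length * (i / cs.length) + cs.length := Nat.add_lt_add_left hm _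
        _ ≤ cs.length * (n / cs.length) + cs.length := Nat.add_le_add_right (Nat.mul_le_mul_left _ h2) _
        _ = (n / cs.length + 1) * cs.length := by ring)]
    simp [List.getD_eq_getElem?_getD]
    rw [List.getElem?_eq_getElem (Nat.mod_lt _ hlen)]
    simp
  · push_neg at hi
    rw [List.getElem?_eq_none (by simpa using hi), List.getElem?_eq_none (by simp; omega)]

-- a fold that appends one block per element is the map, when each block is a singleton
theorem pvFoldAppendMap {β α : Type} (l : List β) (g : β → List α) (f : β → α)
    (h : ∀ x ∈ l, g x = [f x]) :
    ∀ acc : List α, l.foldl (fun a x => a ++ g x) acc = acc ++ l.map f := by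
  induction l with
  | nil => simp
  | cons y ys ih =>
    intro acc
    simp only [List.foldl_cons, List.map_cons]
    rw [h y (by simp), ih (fun x hx => h x (by simp [hx]))]
    simp

-- A's char-by-char modulo melody loop = B's repeat-and-slice melody
theorem pvMelody (cs : List Char) (t : Int) (h : cs ≠ [] ∨ t ≤ 0) :
    (PySem.List.pyRange 0 t 1).foldl
      (fun acc i => acc ++ ((PySem.List.pyGet? cs (PySem.Int.mod i (PySem.List.len cs))).map (fun c => [c])).getD []) [] =
    if cs = [] then ([] : List Char)
    else PySem.List.slice
      (List.flatten (List.replicate (PySem.Int.floordiv (max t 0) (PySem.List.len cs) + 1).toNat cs))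
      none (some (max t 0)) := by
  by_cases hcs : cs = []
  · have ht : t ≤ 0 := h.resolve_left (by simp [hcs])
    rw [if_pos hcs, PySem.List.pyRange_one_eq_nil ht]
    rfl
  · rw [if_neg hcs]
    have hL : 0 < cs.length := List.length_pos_iff.2 hcs
    have hmax : max t 0 = ((t.toNat : Nat) : Int) := by omega
    set n := t.toNat with hn
    have h10 : ((t : Int) - 0).toNat = n := by omega
    rw [PySem.List.pyRange_one, h10, List.foldl_map]
    have hpt : ∀ k ∈ List.range n,
        ((PySem.List.pyGet? cs (PySem.Int.mod ((0:Int) + (k:Int)) (PySem.List.len cs))).map (fun c => [c])).getD [] =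
          [cs.getD (k % cs.length) default] := by
      intro k hk
      have hmod : k % cs.length < cs.length := Nat.mod_lt k hL
      rw [zero_add, PySem.List.len_eq, PySem.Int.mod_natCast, PySem.List.pyGet?_natCast,
        List.getElem?_eq_getElem hmod]
      simp [List.getD_eq_getElem?_getD, List.getElem?_eq_getElem hmod]
    rw [pvFoldAppendMap (List.range n) _ _ hpt, List.nil_append, pvCyc cs hcs n,
      hmax, PySem.List.len_eq, PySem.Int.floordiv_natCast]
    rw [PySem.List.slice_to _ (Int.natCast_nonneg n)]
    simp
    have hdiv : ((n : Int) / (cs.length : Int) + 1).toNat = n / cs.length + 1 := by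
      rw [← Int.natCast_div]
      generalize n / cs.length = q
      omega
    rw [hdiv]

-- head of Python's stable descending sort = Python's max (first maximal element)
theorem pvHeadSortedRev {α : Type} (xs : List α) (key : α → Int) :
    (PySem.List.sorted xs key true).head? = PySem.List.max? xs key := by
  induction xs using List.reverseRecOn with
  | nil => rfl
  | append_singleton xs x ih =>
    rw [PySem.List.sorted_rev_eq_foldl_insertBy, List.foldl_append, List.foldl_cons, List.foldl_nil,
      ← PySem.List.sorted_rev_eq_foldl_insertBy]
    rw [PySem.List.max?, List.foldl_append, List.foldl_cons, List.foldl_nil, ← PySem.List.max?]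
    cases hs : PySem.List.sorted xs key true with
    | nil =>
      have : xs = [] := (PySem.List.sorted_eq_nil_iff _ _ _).1 hs
      subst this
      rfl
    | cons y ys =>
      rw [hs] at ih
      simp only [List.head?] at ih
      rw [← ih]
      by_cases hk : key y < key x
      · simp [PySem.List.insertBy, hk]
      · simp [PySem.List.insertBy, hk]

-- per-line agreement of the two loop bodies
theorem pvStep_eq (st : List Char × PySem.Dict (List Char) Int) (music : List Char)
    (h : pvLineOK music = true) : pvStepA st music = pvStepB st music := by
  simp only [pvLineOK, Bool.and_eq_true, Bool.or_eq_true, decide_eq_true_eq] at h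
  obtain ⟨-, hlast⟩ := h
  simp only [pvStepA, pvStepB, pvSubstB_eq, pvTimes]
  rw [pvMelody _ _ hlast]

-- ===== VERDICT (by name: the statement is the Claim_ definition above) =====
theorem solution_spec : Claim_equal_solution := by
  intro m musicinfos _hd hpre
  unfold Spec_solution
  simp only [solution, solution_alt]
  have hfold :
      List.foldl (fun st music => pvStepA st music.toList) (m.toList, PySem.Dict.empty) musicinfos =
      List.foldl (fun st music => pvStepB st music.toList) (m.toList, PySem.Dict.empty) musicinfos := by
    apply PySem.List.foldl_congr_mem
    intro acc x hx
    exact pvStep_eq acc x.toList (hpre x hx)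
  rw [hfold]
  set d := List.foldl (fun st music => pvStepB st music.toList) (m.toList, PySem.Dict.empty) musicinfos with hd
  cases hitems : d.2.items with
  | nil => simp [PySem.List.len_eq]
  | cons p ps =>
    rw [if_neg (List.cons_ne_nil p ps), if_pos (by rw [PySem.List.len_eq]; exact_mod_cast Nat.succ_pos ps.length)]
    rw [PySem.List.pyGet?_zero, ← List.head?_eq_getElem?, pvHeadSortedRev]
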